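-- pv_equiv track=rewrite | github.com/supriyasingh711/Data-Structures-and-Algorithms | NthRoot.py | powerFunc
-- ===== SOURCE A (Python) =====
-- def powerFunc(mid,n,m):
--     ans=1
--     for _ in range(1,n+1):
--         ans*=mid
--     if ans>m:
--         return 2
--     elif ans==m:
--         return 1
--     return 0
-- ===== SOURCE B (Python) =====
-- def powerFunc(mid, n, m):
--     # exponentiation by squaring instead of a linear multiplication loop
--     ans = 1
--     base = mid
--     e = n if n > 0 else 0
--     while e > 0:
--         if e & 1:
--             ans *= base
--         base *= base
--         e >>= 1
--     return 2 if ans > m else (1 if ans == m else 0)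
-- ===== Notes on version B (the rewrite author's own statement) =====
-- stated objective: faster
-- what changed: Replaces the O(n)-multiplication loop computing mid**n with exponentiation by squaring (O(log n) multiplications).
import Mathlib
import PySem

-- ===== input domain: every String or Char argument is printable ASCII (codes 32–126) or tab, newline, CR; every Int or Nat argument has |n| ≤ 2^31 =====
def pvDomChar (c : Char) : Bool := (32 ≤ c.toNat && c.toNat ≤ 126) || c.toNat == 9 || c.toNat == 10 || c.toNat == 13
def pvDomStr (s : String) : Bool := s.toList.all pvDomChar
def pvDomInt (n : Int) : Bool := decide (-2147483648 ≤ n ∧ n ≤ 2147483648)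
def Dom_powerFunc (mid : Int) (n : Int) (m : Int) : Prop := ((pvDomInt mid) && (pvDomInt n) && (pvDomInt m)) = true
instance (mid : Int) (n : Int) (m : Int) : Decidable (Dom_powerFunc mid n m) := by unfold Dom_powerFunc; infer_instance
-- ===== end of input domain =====

-- B replaces A's linear multiplication loop for mid**n with exponentiation by squaring (faster).

-- ===== PORT A =====
-- literal port: ans = 1; for _ in range(1, n+1): ans *= mid; then compare with m
def powerFunc (mid : Int) (n : Int) (m : Int) : Int :=
  let ans := (PySem.List.pyRange 1 (n + 1) 1).foldl (fun ans _ => ans * mid) 1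
  if ans > m then 2 else if ans = m then 1 else 0

-- ===== PORT B =====
-- while e > 0: if e odd then ans *= base; base *= base; e >>= 1
def pvFastPow (base ans : Int) (e : Nat) : Int :=
  if e = 0 then ans
  else pvFastPow (base * base) (if e % 2 = 1 then ans * base else ans) (e / 2)
decreasing_by exact Nat.div_lt_self (Nat.pos_of_ne_zero (by assumption)) (by norm_num)

def powerFunc_alt (mid : Int) (n : Int) (m : Int) : Int :=
  let e : Nat := (if n > 0 then n else 0).toNat
  let ans := pvFastPow mid 1 e
  if ans > m then 2 else if ans = m then 1 else 0

-- ===== PRECONDITION & SPEC =====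
def Spec_powerFunc (mid : Int) (n : Int) (m : Int) (out : Int) : Prop := out = powerFunc_alt mid n m
instance (mid : Int) (n : Int) (m : Int) (out : Int) : Decidable (Spec_powerFunc mid n m out) := by unfold Spec_powerFunc; infer_instance

-- ===== CLAIM (what is proved, stated in full; the proofs are below) =====
def Claim_equal_powerFunc : Prop := ∀ (mid : Int) (n : Int) (m : Int), Dom_powerFunc mid n m → Spec_powerFunc mid n m (powerFunc mid n m)

-- ===== LEMMAS AND PROOFS =====

theorem pvFoldl_mul (mid : Int) (l : List Int) (a : Int) :
    l.foldl (fun ans _ => ans * mid) a = a * mid ^ l.length := by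
  induction l generalizing a with
  | nil => simp
  | cons x xs ih => simp [List.foldl, ih, pow_succ, mul_assoc, mul_comm mid]

theorem pvFastPow_eq (base ans : Int) (e : Nat) :
    pvFastPow base ans e = ans * base ^ e := by
  induction e using Nat.strong_induction_on generalizing base ans with
  | _ e ih =>
    rcases Nat.eq_zero_or_pos e with h | h
    · simp [h, pvFastPow]
    · rw [pvFastPow, if_neg (Nat.pos_iff_ne_zero.mp h),
        ih (e / 2) (Nat.div_lt_self h (by norm_num))]
      rcases Nat.even_or_odd e with he | he
      · have h2 : e % 2 = 0 := Nat.even_iff.mp he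
        rw [if_neg (by omega)]
        have he' : base ^ e = base ^ (2 * (e / 2)) := by congr 1; omega
        rw [he', show base * base = base ^ 2 from by ring, ← pow_mul]
      · have h2 : e % 2 = 1 := Nat.odd_iff.mp he
        rw [if_pos h2]
        have he' : base ^ e = base ^ (2 * (e / 2)) * base := by
          rw [← pow_succ]; congr 1; omega
        rw [he', show base * base = base ^ 2 from by ring, ← pow_mul]
        ring

-- ===== VERDICT (by name: the statement is the Claim_ definition above) =====
theorem powerFunc_spec : Claim_equal_powerFunc := by
  intro mid n m _
  unfold Spec_powerFunc powerFunc powerFunc_alt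
  simp only [pvFoldl_mul, pvFastPow_eq, PySem.List.length_pyRange_one, one_mul]
  have : (n + 1 - 1).toNat = (if n > 0 then n else 0).toNat := by
    split_ifs with h <;> omega
  rw [this]
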